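-- pv_equiv track=rewrite | github.com/tarun-ainampudi/Python | Prep/Mathprep.py | rightarm
-- ===== SOURCE A (Python) =====
-- def rightarm(list):
--     varlist=list.copy()
--     templist=[]
--     hold=list[len(list)-1]
--     templist.append(hold)
--     list.pop(len(list)-1)
--     while len(list)>0:
--         if hold>=list[0]:
--             templist.append(list[0])
--             list.pop(0)
--         elif hold>=list[len(list)-1]:
--             templist.append(list[len(list)-1])
--             list.pop(len(list)-1)
--         else:
--             break
--     if len(varlist)==len(templist):
--         return 1
--     else:
--         return 0
-- ===== SOURCE B (Python) =====
-- def rightarm(list):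
--     # single index scan over the body instead of A's two-ended peeling loop;
--     # reproduces A's in-place mutation of the argument as well
--     hold = list[len(list) - 1]
--     body = list[:-1]
--     bad = [i for i, x in enumerate(body) if x > hold]
--     if not bad:
--         list[:] = []
--         return 1
--     list[:] = body[bad[0]:bad[-1] + 1]
--     return 0
-- ===== Notes on version B (the rewrite author's own statement) =====
-- stated objective: simpler
-- what changed: Replaces A's two-ended while-loop that peels elements <= the last element off both ends with a single comprehension collecting the indices of body elements greater than the last element; empty collection means return 1, otherwise the residual middle slice is assigned in place and 0 is returned.
-- outside the precondition, e.g. on rightarm([]): A raises IndexError, B raises IndexError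
import Mathlib
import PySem

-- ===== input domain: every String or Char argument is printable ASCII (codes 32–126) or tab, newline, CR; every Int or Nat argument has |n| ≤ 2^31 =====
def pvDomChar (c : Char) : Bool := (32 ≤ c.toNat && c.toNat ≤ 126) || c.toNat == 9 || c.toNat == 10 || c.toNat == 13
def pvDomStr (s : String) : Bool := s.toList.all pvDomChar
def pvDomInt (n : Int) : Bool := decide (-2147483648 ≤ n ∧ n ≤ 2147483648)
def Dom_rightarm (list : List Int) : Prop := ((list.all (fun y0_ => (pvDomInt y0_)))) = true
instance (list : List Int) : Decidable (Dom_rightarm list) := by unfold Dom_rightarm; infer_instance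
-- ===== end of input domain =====

-- B replaces A's two-ended peeling while-loop by one index scan of the body; the equivalence
-- proved here is about the RETURN value only (both Pythons also mutate the argument identically).

-- ===== PORT A =====
-- the while-loop: state is (list, templist); pops front if hold ≥ list[0],
-- else pops back if hold ≥ list[-1], else breaks
def rightarmLoop (hold : Int) (l temp : List Int) : List Int × List Int :=
  match l with
  | [] => ([], temp)
  | a :: rest =>
    if hold ≥ a then
      rightarmLoop hold rest (temp ++ [a])
    else
      if hold ≥ (a :: rest).getLast (by simp) then
        rightarmLoop hold ((a :: rest).dropLast) (temp ++ [(a :: rest).getLast (by simp)])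
      else
        (a :: rest, temp)
termination_by l.length
decreasing_by
  · simp
  · simp

def rightarm (list : List Int) : Int :=
  match list with
  | [] => 0  -- Python raises IndexError here; excluded by Pre_rightarm
  | a :: rest =>
    let varlist := a :: rest          -- list.copy()
    let hold := (a :: rest).getLast (by simp)
    let res := rightarmLoop hold ((a :: rest).dropLast) [hold]
    if varlist.length = res.2.length then 1 else 0

-- ===== PORT B =====
def rightarm_alt (list : List Int) : Int :=
  match list with
  | [] => 0  -- Python raises IndexError here; excluded by Pre_rightarm
  | a :: rest =>
    let hold := (a :: rest).getLast (by simp)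
    let body := (a :: rest).dropLast
    let bad := (PySem.List.enumerate body).filter (fun p => p.2 > hold)
    if bad = [] then 1 else 0

-- ===== PRECONDITION & SPEC =====
-- Pre_ excludes only the empty list, on which the Python A raises IndexError.
def Pre_rightarm (list : List Int) : Prop := list ≠ []
instance (list : List Int) : Decidable (Pre_rightarm list) := by unfold Pre_rightarm; infer_instance
def pvWitness_rightarm : List Int := [3, 1, 4]

def Spec_rightarm (list : List Int) (out : Int) : Prop := out = rightarm_alt list
instance (list : List Int) (out : Int) : Decidable (Spec_rightarm list out) := by unfold Spec_rightarm; infer_instance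

-- ===== CLAIM (what is proved, stated in full; the proofs are below) =====
def Claim_equal_rightarm : Prop := ∀ (list : List Int), Dom_rightarm list → Pre_rightarm list → Spec_rightarm list (rightarm list)

-- ===== LEMMAS AND PROOFS =====

-- length invariant: each loop step moves exactly one element from list to temp
theorem rightarmLoop_len (hold : Int) (l temp : List Int) :
    (rightarmLoop hold l temp).1.length + (rightarmLoop hold l temp).2.length
      = l.length + temp.length := by
  induction l, temp using rightarmLoop.induct hold with
  | case1 temp => simp [rightarmLoop]
  | case2 temp a rest h ih =>
      rw [rightarmLoop]; simp only [if_pos h]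
      simp only [List.length_cons, List.length_append, List.length_nil] at ih ⊢
      omega
  | case3 temp a rest h hb ih =>
      rw [rightarmLoop]; simp only [if_neg h, if_pos hb]
      simp only [List.length_dropLast, List.length_cons, List.length_append,
        List.length_nil] at ih ⊢
      omega
  | case4 temp a rest h hb => rw [rightarmLoop]; simp [if_neg h, if_neg hb]

-- if every element is ≤ hold, the loop consumes the whole list
theorem rightarmLoop_all (hold : Int) (l temp : List Int)
    (h : ∀ x ∈ l, x ≤ hold) : (rightarmLoop hold l temp).1 = [] := by
  induction l generalizing temp with
  | nil => simp [rightarmLoop]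
  | cons a rest ih =>
      rw [rightarmLoop]
      have ha : hold ≥ a := h a (by simp)
      simp only [if_pos ha]
      exact ih _ (fun x hx => h x (by simp [hx]))

-- if some element exceeds hold, the loop leaves a nonempty list
theorem rightarmLoop_some (hold : Int) (l temp : List Int)
    (h : ∃ x ∈ l, hold < x) : (rightarmLoop hold l temp).1 ≠ [] := by
  induction l, temp using rightarmLoop.induct hold with
  | case1 temp => simp at h
  | case2 temp a rest ha ih =>
      rw [rightarmLoop]; simp only [if_pos ha]
      apply ih
      obtain ⟨x, hx, hxh⟩ := h
      rcases List.mem_cons.mp hx with rfl | hx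
      · omega
      · exact ⟨x, hx, hxh⟩
  | case3 temp a rest ha hb ih =>
      rw [rightarmLoop]; simp only [if_neg ha, if_pos hb]
      apply ih
      refine ⟨a, ?_, by omega⟩
      -- a > hold and last ≤ hold, so a is not the last element: a stays in dropLast
      rcases List.eq_nil_or_concat rest with rfl | ⟨ys, y, rfl⟩
      · exfalso
        have : (([a] : List Int)).getLast (by simp) = a := by simp
        rw [this] at hb
        omega
      · have : (a :: (ys ++ [y])).dropLast = a :: ys := by
          simpa using (List.dropLast_concat (l₁ := a :: ys) (b := y))
        simp [this]
  | case4 temp a rest ha hb => rw [rightarmLoop]; simp [if_neg ha, if_neg hb]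

-- the filter in B is empty iff every body element is ≤ hold
theorem bad_empty_iff (hold : Int) (body : List Int) :
    ((PySem.List.enumerate body).filter (fun p => p.2 > hold) = []) ↔ (∀ x ∈ body, x ≤ hold) := by
  rw [List.filter_eq_nil_iff]
  constructor
  · intro h x hx
    obtain ⟨k, hk, rfl⟩ := List.getElem_of_mem hx
    have := h (0 + (k : Int), body[k]) (by
      rw [PySem.List.mem_enumerate_iff]; exact ⟨k, hk, rfl⟩)
    simpa using this
  · intro h p hp
    rw [PySem.List.mem_enumerate_iff] at hp
    obtain ⟨k, hk, rfl⟩ := hp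
    have := h body[k] (List.getElem_mem hk)
    simpa using this

-- ===== VERDICT (by name: the statement is the Claim_ definition above) =====
theorem rightarm_spec : Claim_equal_rightarm := by
  intro list _ hpre
  unfold Spec_rightarm
  match list with
  | [] => exact absurd rfl hpre
  | a :: rest =>
    simp only [rightarm, rightarm_alt]
    set hold := (a :: rest).getLast (by simp) with hh
    set body := (a :: rest).dropLast with hb
    have hlen := rightarmLoop_len hold body [hold]
    have hbodylen : body.length = rest.length := by simp [hb]
    by_cases hall : ∀ x ∈ body, x ≤ hold
    · have h1 := rightarmLoop_all hold body [hold] hall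
      have h2 : (bad_empty_iff hold body).mpr hall = (bad_empty_iff hold body).mpr hall := rfl
      rw [(bad_empty_iff hold body).mpr hall] at *
      have : (rightarmLoop hold body [hold]).2.length = rest.length + 1 := by
        rw [h1] at hlen; simpa [hbodylen] using hlen
      simp [this]
    · push Not at hall
      have hsome : ∃ x ∈ body, hold < x := by
        obtain ⟨x, hx, hxh⟩ := hall; exact ⟨x, hx, by omega⟩
      have h1 := rightarmLoop_some hold body [hold] hsome
      have hbad : ¬ ((PySem.List.enumerate body).filter (fun p => p.2 > hold) = []) := by
        intro hc
        exact absurd ((bad_empty_iff hold body).mp hc) (by push Not; exact hall)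
      have hne : ¬ (rest.length + 1 = (rightarmLoop hold body [hold]).2.length) := by
        intro hc
        have : (rightarmLoop hold body [hold]).1.length = 0 := by
          simp only [hbodylen, List.length_cons, List.length_nil] at hlen
          omega
        exact h1 (List.eq_nil_of_length_eq_zero this)
      simp [if_neg hne, if_neg hbad]
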